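-- pv_equiv track=rewrite | github.com/Willlumm/pubmed-metadata | extractPubMed.py | sortPubsByNLM
-- ===== SOURCE A (Python) =====
-- def sortPubsByNLM(pubs):
--     sortedPubs = dict()
--     for pub in pubs:
--         nlm = pub["NLM ID"]
--         if nlm not in sortedPubs:
--             sortedPubs[nlm] = [pub]
--         else:
--             sortedPubs[nlm].append(pub)
--     return sortedPubs
-- ===== SOURCE B (Python) =====
-- def sortPubsByNLM(pubs):
--     keys = list(dict.fromkeys(pub["NLM ID"] for pub in pubs))
--     return {k: [p for p in pubs if p["NLM ID"] == k] for k in keys}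
-- ===== Notes on version B (the rewrite author's own statement) =====
-- stated objective: alternative
-- what changed: Replaces the single mutate-buckets pass with a two-phase plan: first-occurrence key dedup via dict.fromkeys, then one filter comprehension per key.
import Mathlib
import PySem

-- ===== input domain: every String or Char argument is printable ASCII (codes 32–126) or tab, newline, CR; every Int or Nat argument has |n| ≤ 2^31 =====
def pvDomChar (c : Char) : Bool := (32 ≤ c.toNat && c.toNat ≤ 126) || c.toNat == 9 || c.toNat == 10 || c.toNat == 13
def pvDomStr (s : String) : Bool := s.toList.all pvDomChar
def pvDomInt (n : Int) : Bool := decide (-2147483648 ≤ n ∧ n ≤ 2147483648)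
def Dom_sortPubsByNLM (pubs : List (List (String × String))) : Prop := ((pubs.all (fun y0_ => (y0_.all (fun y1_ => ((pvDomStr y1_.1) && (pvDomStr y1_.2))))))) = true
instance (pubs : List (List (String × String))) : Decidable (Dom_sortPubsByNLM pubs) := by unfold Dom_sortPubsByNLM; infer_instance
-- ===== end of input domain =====

-- B groups publications by their "NLM ID" in two phases (ordered key dedup, then one filter per key)
-- instead of A's single bucket-mutating pass; return values are proved equal on Pre_.

-- pub["NLM ID"]: a Python dict lookup; total form used under Pre_ (which guarantees the key is present)
def pvNlmKey (pub : List (String × String)) : String :=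
  (PySem.Dict.mk pub).getD "NLM ID" ""

-- ===== PORT A =====
def sortPubsByNLM (pubs : List (List (String × String))) : List (String × List (List (String × String))) :=
  (pubs.foldl (fun sortedPubs pub =>
      let nlm := pvNlmKey pub
      if sortedPubs.contains nlm = false then sortedPubs.insert nlm [pub]
      else sortedPubs.modify nlm [] (fun l => l ++ [pub]))
    PySem.Dict.empty).items

-- ===== PORT B =====
def sortPubsByNLM_alt (pubs : List (List (String × String))) : List (String × List (List (String × String))) :=
  let keys := PySem.List.dedup (pubs.map (fun pub => pvNlmKey pub))
  keys.map (fun k => (k, pubs.filter (fun p => pvNlmKey p == k)))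

-- ===== PRECONDITION & SPEC =====
-- Pre_ requires every pub to carry the "NLM ID" key (otherwise Python's pub["NLM ID"] raises KeyError)
-- and no pub's association list to repeat a key (a Python dict cannot hold duplicate keys, so such
-- inputs do not represent any Python value).
def Pre_sortPubsByNLM (pubs : List (List (String × String))) : Prop :=
  ∀ pub ∈ pubs, (PySem.Dict.mk pub).contains "NLM ID" = true ∧ (pub.map Prod.fst).Nodup
instance (pubs : List (List (String × String))) : Decidable (Pre_sortPubsByNLM pubs) := by unfold Pre_sortPubsByNLM; infer_instance

def pvWitness_sortPubsByNLM : (List (List (String × String))) :=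
  [[("NLM ID", "101"), ("Title", "a")], [("NLM ID", "7")], [("NLM ID", "101"), ("Title", "b")]]

def Spec_sortPubsByNLM (pubs : List (List (String × String))) (out : List (String × List (List (String × String)))) : Prop := out = sortPubsByNLM_alt pubs
instance (pubs : List (List (String × String))) (out : List (String × List (List (String × String)))) : Decidable (Spec_sortPubsByNLM pubs out) := by unfold Spec_sortPubsByNLM; infer_instance

-- ===== CLAIM (what is proved, stated in full; the proofs are below) =====
def Claim_equal_sortPubsByNLM : Prop := ∀ (pubs : List (List (String × String))), Dom_sortPubsByNLM pubs → Pre_sortPubsByNLM pubs → Spec_sortPubsByNLM pubs (sortPubsByNLM pubs)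

-- ===== LEMMAS AND PROOFS =====

theorem pv_modify_of_not_contains {κ ν : Type} [BEq κ] [LawfulBEq κ] (d : PySem.Dict κ ν)
    (k : κ) (d0 : ν) (f : ν → ν) (h : d.contains k = false) :
    d.modify k d0 f = d.insert k (f d0) := by
  simp [PySem.Dict.modify, PySem.Dict.getD_of_not_contains d d0 h]

-- A's loop body is exactly one dict.modify (append-to-bucket) step
theorem pv_body_eq :
    (fun (sortedPubs : PySem.Dict String (List (List (String × String)))) pub =>
      let nlm := pvNlmKey pub
      if sortedPubs.contains nlm = false then sortedPubs.insert nlm [pub]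
      else sortedPubs.modify nlm [] (fun l => l ++ [pub]))
    = (fun sortedPubs pub => sortedPubs.modify (pvNlmKey pub) [] (fun l => l ++ [pub])) := by
  funext d pub
  by_cases h : d.contains (pvNlmKey pub) = false
  · simp [h, pv_modify_of_not_contains d _ _ _ h]
  · simp [h]

theorem pv_foldA (pubs : List (List (String × String))) :
    sortPubsByNLM pubs
      = (pubs.foldl (fun d pub => d.modify (pvNlmKey pub) [] (fun l => l ++ [pub]))
          PySem.Dict.empty).items := by
  unfold sortPubsByNLM
  rw [pv_body_eq]

theorem pv_getD_fold (pubs : List (List (String × String))) (c : String) :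
    (pubs.foldl (fun d pub => d.modify (pvNlmKey pub) [] (fun l => l ++ [pub]))
        (PySem.Dict.empty : PySem.Dict String (List (List (String × String))))).getD c []
      = pubs.filter (fun p => pvNlmKey p == c) := by
  have h := PySem.Dict.getD_foldl_modify_append
    (pubs.map (fun p => (pvNlmKey p, p)))
    (PySem.Dict.empty : PySem.Dict String (List (List (String × String)))) c
  rw [List.foldl_map] at h
  simpa [List.filter_map, List.map_map, Function.comp_def] using h

-- ===== VERDICT (by name: the statement is the Claim_ definition above) =====
theorem sortPubsByNLM_spec : Claim_equal_sortPubsByNLM := by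
  intro pubs _ _
  unfold Spec_sortPubsByNLM sortPubsByNLM_alt
  rw [pv_foldA]
  have hnd : (pubs.foldl (fun d pub => d.modify (pvNlmKey pub) [] (fun l => l ++ [pub]))
      (PySem.Dict.empty : PySem.Dict String (List (List (String × String))))).keys.Nodup := by
    exact PySem.Dict.nodup_keys_foldl_modify_key pubs pvNlmKey [] (fun _ pub => (fun l => l ++ [pub]))
      PySem.Dict.empty (by simp [PySem.Dict.keys_empty])
  rw [PySem.Dict.items_eq_map_keys _ hnd []]
  have hkeys : (pubs.foldl (fun d pub => d.modify (pvNlmKey pub) [] (fun l => l ++ [pub]))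
      (PySem.Dict.empty : PySem.Dict String (List (List (String × String))))).keys
      = PySem.Set.ofList (pubs.map pvNlmKey) := by
    have := PySem.Dict.keys_foldl_modify_key pubs pvNlmKey [] (fun _ pub => (fun l => l ++ [pub]))
      (PySem.Dict.empty : PySem.Dict String (List (List (String × String))))
    simpa [PySem.Dict.keys_empty, PySem.Set.update, PySem.Set.ofList_eq_foldl] using this
  rw [hkeys]
  simp only [PySem.List.dedup_eq_ofList]
  exact List.map_congr_left (fun k _ => by rw [pv_getD_fold])
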